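-- pv_equiv track=rewrite | github.com/jmspigelman/opennemsld | src/findpath.py | _calculate_busbar_crossing_penalties
-- ===== SOURCE A (Python) =====
-- def _calculate_busbar_crossing_penalties(
--     busbar_edges: dict,
--     start_owner: tuple,
--     end_owner: tuple,
--     busbar_crossing_penalty: int,
-- ) -> dict:
--     """Calculates penalties for a path crossing various busbars.
--
--     This function determines the penalty for crossing each busbar edge based
--     on the ownership of the path and the busbar. It includes hierarchical
--     relationships to prevent crossing foreign busbars at any level.
--
--     Args:
--         busbar_edges: A dictionary of busbar edges and their owners.
--         start_owner: The owner tuple (substation_name, owner_id) of the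
--             path's start point.
--         end_owner: The owner tuple of the path's end point.
--         busbar_crossing_penalty: The high penalty value for an illegal crossing.
--
--     Returns:
--         A dictionary mapping busbar edges to their calculated penalty value.
--     """
--     def _get_allowed_owners_for_substation(sub_name: str, path_owner: str) -> set:
--         """Get all owner IDs that are allowed for a given substation and path owner."""
--         allowed = {path_owner}
--
--         # If path owner is main, allow all children
--         if path_owner == "main":
--             # Add all possible child owners (we'll be conservative and allow child_0 through child_9)
--             for i in range(10):
--                 allowed.add(f"child_{i}")
--
--         # If path owner is a child, allow main and all other children
--         elif path_owner.startswith("child_"):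
--             allowed.add("main")
--             for i in range(10):
--                 allowed.add(f"child_{i}")
--
--         return allowed
--
--     edge_penalties = {}
--     for edge, owner in busbar_edges.items():
--         if not owner:
--             edge_penalties[edge] = 1
--             continue
--
--         bus_sub_name, bus_owner_id = owner
--
--         # An intra-substation connection
--         if start_owner[0] == end_owner[0]:
--             path_sub_name = start_owner[0]
--
--             # If path is inside one sub, but crosses busbar of another sub
--             if bus_sub_name != path_sub_name:
--                 edge_penalties[edge] = busbar_crossing_penalty
--             else:
--                 # Path is within the same substation
--                 # Check if the busbar owner is related to either start or end owner
--                 start_allowed_owners = _get_allowed_owners_for_substation(path_sub_name, start_owner[1])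
--                 end_allowed_owners = _get_allowed_owners_for_substation(path_sub_name, end_owner[1])
--
--                 if bus_owner_id in start_allowed_owners or bus_owner_id in end_allowed_owners:
--                     # Crossing a related busbar, small penalty
--                     edge_penalties[edge] = 1
--                 else:
--                     # Crossing an unrelated busbar within the same substation
--                     edge_penalties[edge] = busbar_crossing_penalty
--
--         # An inter-substation connection
--         else:
--             path_sub_names = {start_owner[0], end_owner[0]}
--
--             # If it crosses a busbar of an unrelated substation
--             if bus_sub_name not in path_sub_names:
--                 edge_penalties[edge] = busbar_crossing_penalty
--             else:
--                 # Busbar belongs to one of the connected substations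
--                 # Check if the busbar owner is related to the appropriate path owner
--                 if bus_sub_name == start_owner[0]:
--                     allowed_owners = _get_allowed_owners_for_substation(bus_sub_name, start_owner[1])
--                 elif bus_sub_name == end_owner[0]:
--                     allowed_owners = _get_allowed_owners_for_substation(bus_sub_name, end_owner[1])
--                 else:
--                     allowed_owners = set()
--
--                 if bus_owner_id in allowed_owners:
--                     # Crossing a related busbar, small penalty
--                     edge_penalties[edge] = 1
--                 else:
--                     # Crossing an unrelated busbar within a connected substation
--                     edge_penalties[edge] = busbar_crossing_penalty
--
--     return edge_penalties
-- ===== SOURCE B (Python) =====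
-- def _calculate_busbar_crossing_penalties(
--     busbar_edges: dict,
--     start_owner: tuple,
--     end_owner: tuple,
--     busbar_crossing_penalty: int,
-- ) -> dict:
--     """Same penalties, computed via one precomputed set of allowed
--     (substation, owner) pairs and a single flat pass over the edges."""
--
--     def _allowed_owners(path_owner: str) -> set:
--         allowed = {path_owner}
--         if path_owner == "main":
--             for i in range(10):
--                 allowed.add(f"child_{i}")
--         elif path_owner.startswith("child_"):
--             allowed.add("main")
--             for i in range(10):
--                 allowed.add(f"child_{i}")
--         return allowed
--
--     allowed_pairs = {(start_owner[0], o) for o in _allowed_owners(start_owner[1])} | {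
--         (end_owner[0], o) for o in _allowed_owners(end_owner[1])
--     }
--
--     return {
--         edge: (1 if not owner or tuple(owner) in allowed_pairs else busbar_crossing_penalty)
--         for edge, owner in busbar_edges.items()
--     }
-- ===== Notes on version B (the rewrite author's own statement) =====
-- stated objective: simpler
-- what changed: Replaces A's per-edge intra/inter-substation case analysis (with two or three lazily built allowed-owner sets per edge) by one precomputed set of allowed (substation, owner) pairs and a single flat pass with one membership test per edge.
import Mathlib
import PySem

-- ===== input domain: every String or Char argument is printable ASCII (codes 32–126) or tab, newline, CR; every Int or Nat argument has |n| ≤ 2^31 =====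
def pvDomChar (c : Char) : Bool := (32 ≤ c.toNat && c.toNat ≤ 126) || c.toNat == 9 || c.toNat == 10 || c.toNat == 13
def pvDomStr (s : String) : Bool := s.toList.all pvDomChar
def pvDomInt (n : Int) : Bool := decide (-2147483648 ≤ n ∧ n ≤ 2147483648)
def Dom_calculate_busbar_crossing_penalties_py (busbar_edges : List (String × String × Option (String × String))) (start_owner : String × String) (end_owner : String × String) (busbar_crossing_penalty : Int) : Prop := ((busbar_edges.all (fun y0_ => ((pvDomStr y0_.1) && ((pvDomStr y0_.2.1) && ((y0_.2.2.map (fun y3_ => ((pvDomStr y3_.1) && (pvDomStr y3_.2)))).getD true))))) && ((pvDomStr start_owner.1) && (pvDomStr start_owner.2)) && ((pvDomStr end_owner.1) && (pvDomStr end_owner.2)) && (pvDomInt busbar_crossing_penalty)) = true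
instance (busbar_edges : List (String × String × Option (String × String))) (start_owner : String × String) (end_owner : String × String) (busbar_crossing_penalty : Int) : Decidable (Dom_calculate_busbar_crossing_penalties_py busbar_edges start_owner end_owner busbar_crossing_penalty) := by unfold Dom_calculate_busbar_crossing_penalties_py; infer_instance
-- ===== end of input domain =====

-- ===== PORT A =====
-- B replaces A's per-edge intra/inter branching by one precomputed set of allowed
-- (substation, owner) pairs and a flat pass (objective: simpler); return value only.
-- helper _get_allowed_owners_for_substation (sub_name is unused, as in the Python)
def pvAllowedA (_sub_name path_owner : String) : PySem.Set String :=
  let allowed : PySem.Set String := PySem.Set.ofList [path_owner]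
  if path_owner == "main" then
    (PySem.List.pyRange 0 10 1).foldl
      (fun s i => PySem.Set.add s ("child_" ++ PySem.Int.toStr i)) allowed
  else if PySem.Str.startswith path_owner "child_" then
    let allowed := PySem.Set.add allowed "main"
    (PySem.List.pyRange 0 10 1).foldl
      (fun s i => PySem.Set.add s ("child_" ++ PySem.Int.toStr i)) allowed
  else
    allowed

def calculate_busbar_crossing_penalties_py (busbar_edges : List (String × String × Option (String × String))) (start_owner : String × String) (end_owner : String × String) (busbar_crossing_penalty : Int) : List (String × String × Int) :=
  let edge_penalties : PySem.Dict (String × String) Int :=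
    busbar_edges.foldl
      (fun d ent =>
        let edge := (ent.1, ent.2.1)
        match ent.2.2 with
        | none => d.insert edge 1        -- 'if not owner: … = 1; continue'
        | some ow =>
          let bus_sub_name := ow.1
          let bus_owner_id := ow.2
          if start_owner.1 == end_owner.1 then
            -- intra-substation connection
            let path_sub_name := start_owner.1
            if !(bus_sub_name == path_sub_name) then
              d.insert edge busbar_crossing_penalty
            else
              let start_allowed := pvAllowedA path_sub_name start_owner.2
              let end_allowed := pvAllowedA path_sub_name end_owner.2
              if PySem.Set.contains start_allowed bus_owner_id ||
                 PySem.Set.contains end_allowed bus_owner_id then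
                d.insert edge 1
              else
                d.insert edge busbar_crossing_penalty
          else
            -- inter-substation connection
            let path_sub_names : PySem.Set String :=
              PySem.Set.ofList [start_owner.1, end_owner.1]
            if !(PySem.Set.contains path_sub_names bus_sub_name) then
              d.insert edge busbar_crossing_penalty
            else
              let allowed_owners :=
                if bus_sub_name == start_owner.1 then
                  pvAllowedA bus_sub_name start_owner.2
                else if bus_sub_name == end_owner.1 then
                  pvAllowedA bus_sub_name end_owner.2
                else
                  PySem.Set.empty
              if PySem.Set.contains allowed_owners bus_owner_id then
                d.insert edge 1
              else
                d.insert edge busbar_crossing_penalty)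
      PySem.Dict.empty
  edge_penalties.items.map (fun p => (p.1.1, p.1.2, p.2))

-- ===== PORT B =====
-- helper _allowed_owners of Source B (same body as A's helper, without the unused sub_name)
def pvAllowedB (path_owner : String) : PySem.Set String :=
  let allowed : PySem.Set String := PySem.Set.ofList [path_owner]
  if path_owner == "main" then
    (PySem.List.pyRange 0 10 1).foldl
      (fun s i => PySem.Set.add s ("child_" ++ PySem.Int.toStr i)) allowed
  else if PySem.Str.startswith path_owner "child_" then
    let allowed := PySem.Set.add allowed "main"
    (PySem.List.pyRange 0 10 1).foldl
      (fun s i => PySem.Set.add s ("child_" ++ PySem.Int.toStr i)) allowed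
  else
    allowed

def calculate_busbar_crossing_penalties_py_alt (busbar_edges : List (String × String × Option (String × String))) (start_owner : String × String) (end_owner : String × String) (busbar_crossing_penalty : Int) : List (String × String × Int) :=
  let allowed_pairs : PySem.Set (String × String) :=
    PySem.Set.union
      (PySem.Set.ofList ((pvAllowedB start_owner.2).map (fun o => (start_owner.1, o))))
      ((pvAllowedB end_owner.2).map (fun o => (end_owner.1, o)))
  let d : PySem.Dict (String × String) Int :=
    busbar_edges.foldl
      (fun d ent =>
        d.insert (ent.1, ent.2.1)
          (match ent.2.2 with
           | none => 1
           | some ow =>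
             if PySem.Set.contains allowed_pairs ow then 1
             else busbar_crossing_penalty))
      PySem.Dict.empty
  d.items.map (fun p => (p.1.1, p.1.2, p.2))

-- ===== PRECONDITION & SPEC =====
def Spec_calculate_busbar_crossing_penalties_py (busbar_edges : List (String × String × Option (String × String))) (start_owner : String × String) (end_owner : String × String) (busbar_crossing_penalty : Int) (out : List (String × String × Int)) : Prop := out = calculate_busbar_crossing_penalties_py_alt busbar_edges start_owner end_owner busbar_crossing_penalty
instance (busbar_edges : List (String × String × Option (String × String))) (start_owner : String × String) (end_owner : String × String) (busbar_crossing_penalty : Int) (out : List (String × String × Int)) : Decidable (Spec_calculate_busbar_crossing_penalties_py busbar_edges start_owner end_owner busbar_crossing_penalty out) := by unfold Spec_calculate_busbar_crossing_penalties_py; infer_instance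

-- ===== CLAIM (what is proved, stated in full; the proofs are below) =====
def Claim_equal_calculate_busbar_crossing_penalties_py : Prop := ∀ (busbar_edges : List (String × String × Option (String × String))) (start_owner : String × String) (end_owner : String × String) (busbar_crossing_penalty : Int), Dom_calculate_busbar_crossing_penalties_py busbar_edges start_owner end_owner busbar_crossing_penalty → Spec_calculate_busbar_crossing_penalties_py busbar_edges start_owner end_owner busbar_crossing_penalty (calculate_busbar_crossing_penalties_py busbar_edges start_owner end_owner busbar_crossing_penalty)


-- ===== LEMMAS AND PROOFS =====
-- the two allowed-owner helpers compute the same set (A's sub_name parameter is unused)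
lemma pvAllowed_eq (s o : String) : pvAllowedA s o = pvAllowedB o := rfl

-- membership in B's precomputed pair set, componentwise
lemma pv_mem_pairs (s0 e0 : String) (sa ea : PySem.Set String) (bs bo : String) :
    (bs, bo) ∈
      PySem.Set.union (PySem.Set.ofList (sa.map (fun o => (s0, o))))
        (ea.map (fun o => (e0, o)))
      ↔ ((bs = s0 ∧ bo ∈ sa) ∨ (bs = e0 ∧ bo ∈ ea)) := by
  rw [PySem.Set.mem_union, PySem.Set.mem_ofList]
  simp only [List.mem_map, Prod.mk.injEq]
  aesop

-- ===== VERDICT (by name: the statement is the Claim_ definition above) =====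
theorem calculate_busbar_crossing_penalties_py_spec : Claim_equal_calculate_busbar_crossing_penalties_py := by
  intro be so eo P _hdom
  unfold Spec_calculate_busbar_crossing_penalties_py
  unfold calculate_busbar_crossing_penalties_py calculate_busbar_crossing_penalties_py_alt
  apply congrArg (fun (d : PySem.Dict (String × String) Int) => d.items.map (fun p => (p.1.1, p.1.2, p.2)))
  apply PySem.List.foldl_congr_mem
  intro d ent _
  obtain ⟨a, b, ow⟩ := ent
  rcases ow with _ | ⟨bs, bo⟩
  · rfl
  · simp only [pvAllowed_eq, Bool.or_eq_true, Bool.not_eq_true', Bool.eq_false_iff,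
      beq_iff_eq, ne_eq, PySem.Set.contains_iff, pv_mem_pairs,
      PySem.Set.mem_ofList, List.mem_cons, List.not_mem_nil, or_false]
    split_ifs <;> first | rfl | (exfalso; simp_all)
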